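-- pv_equiv track=rewrite | github.com/uw-swag/ipynb-edit | dataset-collection/code/commits_summary.py | get_line_change_num
-- ===== SOURCE A (Python) =====
-- def get_line_change_num(diff):
--     lines = diff.splitlines()
--     minus_count = 0
--     plus_count = 0
--     edit_count = 0
--     p_minus = False
--     for l in lines:
--         if l.startswith('+++') or l.startswith('---'):
--             continue
--         if l.startswith('-'):
--             minus_count += 1
--             p_minus = True
--         elif l.startswith('+'):
--             plus_count += 1
--             if p_minus:
--                 edit_count += 1
--             p_minus = False
--         else:
--             p_minus = False
--     add_count = plus_count - minus_count
--     return edit_count, add_count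
-- ===== SOURCE B (Python) =====
-- def get_line_change_num(diff):
--     tokens = []
--     for l in diff.splitlines():
--         if l.startswith('+++') or l.startswith('---'):
--             continue
--         if l.startswith('-'):
--             tokens.append('-')
--         elif l.startswith('+'):
--             tokens.append('+')
--         else:
--             tokens.append('c')
--     plus = tokens.count('+')
--     minus = tokens.count('-')
--     edit = sum(1 for a, b in zip(tokens, tokens[1:]) if a == '-' and b == '+')
--     return edit, plus - minus
-- ===== Notes on version B (the rewrite author's own statement) =====
-- stated objective: alternative
-- what changed: Replaces A's single fold carrying a p_minus flag with a tokenization pass (one class token per non-header line) followed by three independent reductions: two counts and an adjacent-pair scan over zip(tokens, tokens[1:]) for edits.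
import Mathlib
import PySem

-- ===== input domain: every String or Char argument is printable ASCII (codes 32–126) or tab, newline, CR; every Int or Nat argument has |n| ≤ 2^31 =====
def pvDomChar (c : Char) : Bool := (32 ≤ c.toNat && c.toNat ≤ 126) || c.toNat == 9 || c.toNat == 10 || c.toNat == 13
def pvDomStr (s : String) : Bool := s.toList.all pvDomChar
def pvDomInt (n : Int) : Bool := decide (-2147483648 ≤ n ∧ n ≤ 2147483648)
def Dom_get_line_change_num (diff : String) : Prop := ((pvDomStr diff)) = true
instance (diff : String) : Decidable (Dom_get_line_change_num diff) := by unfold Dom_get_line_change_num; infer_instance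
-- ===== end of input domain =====

-- B replaces A's single stateful fold (carried p_minus flag) with a token list per line
-- plus three independent reductions (two counts and an adjacent-pair scan); objective: alternative.


-- ===== PORT A =====
def get_line_change_num (diff : String) : Int × Int :=
  let lines := PySem.Str.splitlines diff
  let st := lines.foldl (fun (s : Int × Int × Int × Bool) l =>
    let m := s.1; let p := s.2.1; let e := s.2.2.1; let pm := s.2.2.2
    if PySem.Str.startswith l "+++" || PySem.Str.startswith l "---" then s
    else if PySem.Str.startswith l "-" then (m + 1, p, e, true)
    else if PySem.Str.startswith l "+" then (m, p + 1, e + (if pm then 1 else 0), false)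
    else (m, p, e, false)) (0, 0, 0, false)
  (st.2.2.1, st.2.1 - st.1)

-- ===== PORT B =====
def pvTokensOf (lines : List String) : List Char :=
  lines.foldl (fun acc l =>
    if PySem.Str.startswith l "+++" || PySem.Str.startswith l "---" then acc
    else if PySem.Str.startswith l "-" then acc ++ ['-']
    else if PySem.Str.startswith l "+" then acc ++ ['+']
    else acc ++ ['c']) []

def get_line_change_num_alt (diff : String) : Int × Int :=
  let tokens := pvTokensOf (PySem.Str.splitlines diff)
  let plus : Int := (tokens.count '+' : Int)
  let minus : Int := (tokens.count '-' : Int)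
  let edit : Int := (((tokens.zip tokens.tail).filter (fun p => p.1 == '-' && p.2 == '+')).length : Int)
  (edit, plus - minus)

-- ===== PRECONDITION & SPEC =====
def Spec_get_line_change_num (diff : String) (out : Int × Int) : Prop := out = get_line_change_num_alt diff
instance (diff : String) (out : Int × Int) : Decidable (Spec_get_line_change_num diff out) := by unfold Spec_get_line_change_num; infer_instance

-- ===== CLAIM (what is proved, stated in full; the proofs are below) =====
def Claim_equal_get_line_change_num : Prop := ∀ (diff : String), Dom_get_line_change_num diff → Spec_get_line_change_num diff (get_line_change_num diff)

-- ===== LEMMAS AND PROOFS =====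

-- recursive characterization of the token list
def pvTokRec (lines : List String) : List Char :=
  match lines with
  | [] => []
  | l :: ls =>
    if PySem.Str.startswith l "+++" || PySem.Str.startswith l "---" then pvTokRec ls
    else if PySem.Str.startswith l "-" then '-' :: pvTokRec ls
    else if PySem.Str.startswith l "+" then '+' :: pvTokRec ls
    else 'c' :: pvTokRec ls

theorem pvTokensOf_go (ls : List String) (acc : List Char) :
    ls.foldl (fun acc l =>
      if PySem.Str.startswith l "+++" || PySem.Str.startswith l "---" then acc
      else if PySem.Str.startswith l "-" then acc ++ ['-']
      else if PySem.Str.startswith l "+" then acc ++ ['+']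
      else acc ++ ['c']) acc = acc ++ pvTokRec ls := by
  induction ls generalizing acc with
  | nil => simp [pvTokRec]
  | cons l ls ih =>
    simp only [List.foldl_cons, pvTokRec]
    split_ifs <;> rw [ih] <;> simp

theorem pvTokensOf_eq (ls : List String) : pvTokensOf ls = pvTokRec ls := by
  unfold pvTokensOf; rw [pvTokensOf_go]; simp

-- edit count with a carried previous-was-minus flag
def pvEdits (pm : Bool) (ts : List Char) : Int :=
  match ts with
  | [] => 0
  | t :: ts => (if t = '+' ∧ pm then 1 else 0) + pvEdits (t = '-') ts

def pvPmAfter (pm : Bool) (ts : List Char) : Bool :=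
  match ts with
  | [] => pm
  | t :: ts => pvPmAfter (t = '-') ts

def pvPairCount (ts : List Char) : Int :=
  (((ts.zip ts.tail).filter (fun p => p.1 == '-' && p.2 == '+')).length : Int)

theorem pvPairCount_cons (t : Char) (ts : List Char) :
    pvPairCount (t :: ts) = pvEdits (t = '-') ts := by
  induction ts generalizing t with
  | nil => simp [pvPairCount, pvEdits]
  | cons u us ih =>
    simp only [pvEdits, ← ih u]
    simp only [pvPairCount, List.tail_cons, List.zip_cons_cons, List.filter_cons]
    by_cases hu : u = '+' <;> by_cases ht : t = '-' <;>
      simp [hu, ht] <;> push_cast <;> ring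

theorem pvPairCount_eq (ts : List Char) : pvPairCount ts = pvEdits false ts := by
  cases ts with
  | nil => simp [pvPairCount, pvEdits]
  | cons t ts => rw [pvPairCount_cons]; simp [pvEdits]

-- the main loop invariant for A's fold
theorem pvLoop_eq (ls : List String) (m p e : Int) (pm : Bool) :
    ls.foldl (fun (s : Int × Int × Int × Bool) l =>
      let m := s.1; let p := s.2.1; let e := s.2.2.1; let pm := s.2.2.2
      if PySem.Str.startswith l "+++" || PySem.Str.startswith l "---" then s
      else if PySem.Str.startswith l "-" then (m + 1, p, e, true)
      else if PySem.Str.startswith l "+" then (m, p + 1, e + (if pm then 1 else 0), false)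
      else (m, p, e, false)) (m, p, e, pm)
    = (m + ((pvTokRec ls).count '-' : Int), p + ((pvTokRec ls).count '+' : Int),
       e + pvEdits pm (pvTokRec ls), pvPmAfter pm (pvTokRec ls)) := by
  induction ls generalizing m p e pm with
  | nil => simp [pvTokRec, pvEdits, pvPmAfter]
  | cons l ls ih =>
    simp only [List.foldl_cons, pvTokRec]
    split_ifs <;> rw [ih] <;>
      simp [pvEdits, pvPmAfter, List.count_cons, Prod.ext_iff] <;>
      push_cast <;> and_intros <;> (try simp_all) <;> (try ring)

-- ===== VERDICT (by name: the statement is the Claim_ definition above) =====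
theorem get_line_change_num_spec : Claim_equal_get_line_change_num := by
  intro diff _
  show get_line_change_num diff = get_line_change_num_alt diff
  have hA : get_line_change_num diff =
      (pvEdits false (pvTokRec (PySem.Str.splitlines diff)),
       ((pvTokRec (PySem.Str.splitlines diff)).count '+' : Int)
         - ((pvTokRec (PySem.Str.splitlines diff)).count '-' : Int)) := by
    unfold get_line_change_num
    simp only [pvLoop_eq]
    simp
  have hB : get_line_change_num_alt diff =
      (pvPairCount (pvTokRec (PySem.Str.splitlines diff)),
       ((pvTokRec (PySem.Str.splitlines diff)).count '+' : Int)
         - ((pvTokRec (PySem.Str.splitlines diff)).count '-' : Int)) := by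
    unfold get_line_change_num_alt pvPairCount
    simp only [pvTokensOf_eq]
  rw [hA, hB, pvPairCount_eq]
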